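-- pv_equiv track=rewrite | github.com/bilaloguz/cryptology | python/cryptology/classical/substitution/composite/adfgvx.py | _create_frequency_adfgvx_square
-- ===== SOURCE A (Python) =====
-- DEFAULT_ADFGVX_ALPHABET = "ABCDEFGHIJKLMNOPQRSTUVWXYZ0123456789"
--
-- def _create_frequency_adfgvx_square(alphabet: str = DEFAULT_ADFGVX_ALPHABET) -> str:
--     """Create a frequency-based 6×6 square."""
--     alphabet_upper = alphabet.upper()
--
--     # English frequency order (A-Z, 0-9)
--     frequency_order = "ETAOINSHRDLCUMWFGYPBVKXJQZ0123456789"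
--
--     # Take letters in frequency order
--     square_letters = ""
--     used = set()
--
--     for char in frequency_order:
--         if char in alphabet_upper and char not in used:
--             square_letters += char
--             used.add(char)
--
--     # Add remaining characters
--     for char in alphabet_upper:
--         if char not in used:
--             square_letters += char
--             used.add(char)
--
--     # Take first 36 characters
--     square_letters = square_letters[:36]
--
--     # Create 6×6 square
--     square_lines = []
--     for i in range(6):
--         start_idx = i * 6
--         end_idx = start_idx + 6
--         square_lines.append(square_letters[start_idx:end_idx])
--
--     return '\n'.join(square_lines)
-- ===== SOURCE B (Python) =====
-- DEFAULT_ADFGVX_ALPHABET = "ABCDEFGHIJKLMNOPQRSTUVWXYZ0123456789"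
--
-- def _create_frequency_adfgvx_square(alphabet: str = DEFAULT_ADFGVX_ALPHABET) -> str:
--     """Create a frequency-based 6x6 square (stable sort by frequency rank)."""
--     frequency_order = "ETAOINSHRDLCUMWFGYPBVKXJQZ0123456789"
--     distinct = "".join(dict.fromkeys(alphabet.upper()))
--
--     def rank(c):
--         if c in frequency_order:
--             return frequency_order.index(c)
--         return len(frequency_order) + distinct.index(c)
--
--     square_letters = "".join(sorted(distinct, key=rank))[:36]
--     return "\n".join(square_letters[i:i + 6] for i in range(0, 36, 6))
-- ===== Notes on version B (the rewrite author's own statement) =====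
-- stated objective: alternative
-- what changed: Replaces the two membership-filter passes with a used-set by a first-occurrence dedup (dict.fromkeys) followed by one stable sort keyed by frequency rank (appearance rank as sentinel for non-frequency characters).
import Mathlib
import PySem

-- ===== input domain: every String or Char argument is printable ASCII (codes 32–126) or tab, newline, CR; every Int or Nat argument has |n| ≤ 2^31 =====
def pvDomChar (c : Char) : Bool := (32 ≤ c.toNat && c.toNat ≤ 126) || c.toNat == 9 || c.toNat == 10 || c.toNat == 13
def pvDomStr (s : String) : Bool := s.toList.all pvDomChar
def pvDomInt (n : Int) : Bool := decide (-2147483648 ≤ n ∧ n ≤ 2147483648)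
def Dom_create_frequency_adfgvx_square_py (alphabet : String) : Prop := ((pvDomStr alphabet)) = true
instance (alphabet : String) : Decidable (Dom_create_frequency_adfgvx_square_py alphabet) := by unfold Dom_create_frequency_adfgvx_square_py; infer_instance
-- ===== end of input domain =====

-- B replaces A's two filter passes over a used-set by dedup-then-stable-sort keyed by frequency rank (alternative decomposition, same cost class).

-- ===== PORT A =====
-- the shared literal constant frequency_order
def pvFreq : List Char := "ETAOINSHRDLCUMWFGYPBVKXJQZ0123456789".toList

def create_frequency_adfgvx_square_py (alphabet : String) : String :=
  let alphabet_upper := PySem.Chars.upper alphabet.toList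
  -- 'char in alphabet_upper' for the single characters of frequency_order is exactly list membership
  let st1 := pvFreq.foldl (fun (st : List Char × PySem.Set Char) c =>
      if alphabet_upper.contains c && !(PySem.Set.contains st.2 c) then (st.1 ++ [c], PySem.Set.add st.2 c) else st)
    ([], PySem.Set.empty)
  let st2 := alphabet_upper.foldl (fun (st : List Char × PySem.Set Char) c =>
      if !(PySem.Set.contains st.2 c) then (st.1 ++ [c], PySem.Set.add st.2 c) else st) st1
  let square_letters := PySem.List.slice st2.1 none (some 36)
  let square_lines := (PySem.List.pyRange 0 6 1).foldl (fun (acc : List (List Char)) i =>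
      acc ++ [PySem.List.slice square_letters (some (i*6)) (some (i*6+6))]) []
  String.ofList (PySem.Chars.join ['\n'] square_lines)

-- ===== PORT B =====
-- Source B's rank(c): frequency_order.index(c) if c in frequency_order else len(frequency_order) + distinct.index(c)
-- (rank is only ever applied to members of `distinct`, so the getD default of Python's distinct.index is dead)
def pvRank (distinct : List Char) (c : Char) : Int :=
  match PySem.List.index? pvFreq c with
  | some i => (i : Int)
  | none => (pvFreq.length : Int) + (((PySem.List.index? distinct c).getD 0 : Nat) : Int)

def create_frequency_adfgvx_square_py_alt (alphabet : String) : String :=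
  let distinct := PySem.List.dedup (PySem.Chars.upper alphabet.toList)
  let square_letters := PySem.List.slice (PySem.List.sorted distinct (pvRank distinct)) none (some 36)
  String.ofList (PySem.Chars.join ['\n']
    ((PySem.List.pyRange 0 36 6).map (fun i => PySem.List.slice square_letters (some i) (some (i+6)))))

-- ===== PRECONDITION & SPEC =====
def Spec_create_frequency_adfgvx_square_py (alphabet : String) (out : String) : Prop := out = create_frequency_adfgvx_square_py_alt alphabet
instance (alphabet : String) (out : String) : Decidable (Spec_create_frequency_adfgvx_square_py alphabet out) := by unfold Spec_create_frequency_adfgvx_square_py; infer_instance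

-- ===== CLAIM (what is proved, stated in full; the proofs are below) =====
def Claim_equal_create_frequency_adfgvx_square_py : Prop := ∀ (alphabet : String), Dom_create_frequency_adfgvx_square_py alphabet → Spec_create_frequency_adfgvx_square_py alphabet (create_frequency_adfgvx_square_py alphabet)

-- ===== LEMMAS AND PROOFS =====

lemma pv_idxOf?_eq (l : List Char) (c : Char) :
    l.idxOf? c = if c ∈ l then some (l.idxOf c) else none := by
  induction l with
  | nil => simp
  | cons a t ih =>
    by_cases hac : c = a
    · subst hac; simp [List.idxOf?_cons]
    · simp [List.idxOf?_cons, beq_iff_eq, hac, ih, Ne.symm hac]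

lemma pvRank_of_mem (d : List Char) {c : Char} (h : c ∈ pvFreq) :
    pvRank d c = (pvFreq.idxOf c : Int) := by
  simp [pvRank, PySem.List.index?_eq_idxOf?, pv_idxOf?_eq, h]

lemma pvRank_of_not_mem (d : List Char) {c : Char} (hc : c ∉ pvFreq) (hd : c ∈ d) :
    pvRank d c = 36 + (d.idxOf c : Int) := by
  simp [pvRank, PySem.List.index?_eq_idxOf?, pv_idxOf?_eq, hc, hd]
  decide

lemma pv_pairwise_idxOf_filter (l : List Char) (p : Char → Bool) (h : l.Nodup) :
    (l.filter p).Pairwise (fun a b => l.idxOf a < l.idxOf b) := by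
  refine List.Pairwise.sublist l.filter_sublist ?_
  refine List.pairwise_iff_getElem.mpr ?_
  intro i j hi hj hij
  rw [List.Nodup.idxOf_getElem h i hi, List.Nodup.idxOf_getElem h j hj]
  exact hij

-- loop 1 of A: over the (duplicate-free) frequency_order, the used-set test never fires
lemma pv_loopA1 (up : List Char) (l acc : List Char) (s : PySem.Set Char) (hl : l.Nodup)
    (hdisj : ∀ c ∈ l, PySem.Set.contains s c = false) :
    l.foldl (fun (st : List Char × PySem.Set Char) c =>
        if up.contains c && !(PySem.Set.contains st.2 c) then (st.1 ++ [c], PySem.Set.add st.2 c) else st) (acc, s)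
      = (acc ++ l.filter (fun c => up.contains c), s ++ l.filter (fun c => up.contains c)) := by
  induction l generalizing acc s with
  | nil => simp
  | cons c t ih =>
    obtain ⟨hct, ht⟩ := List.nodup_cons.mp hl
    have hsc := hdisj c (List.mem_cons_self)
    have hdisj' : ∀ x ∈ t, PySem.Set.contains (s ++ [c]) x = false := by
      intro x hx
      have hxs := hdisj x (List.mem_cons_of_mem _ hx)
      have hxc : x ≠ c := fun he => hct (he ▸ hx)
      simp [PySem.Set.contains, List.contains_eq_mem] at hxs ⊢
      exact ⟨hxs, hxc⟩
    have hadd : PySem.Set.add s c = s ++ [c] := by unfold PySem.Set.add; rw [hsc]; simp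
    by_cases hup : up.contains c = true
    · have hcond : (up.contains c && !(PySem.Set.contains s c)) = true := by rw [hup, hsc]; rfl
      rw [List.foldl_cons]
      rw [if_pos hcond, hadd, ih (acc ++ [c]) (s ++ [c]) ht hdisj']
      have hmem : c ∈ up := by simpa [List.contains_eq_mem] using hup
      simp [hmem]
    · have hupf : up.contains c = false := by simpa using hup
      have hcond : (up.contains c && !(PySem.Set.contains s c)) = false := by rw [hupf]; rfl
      rw [List.foldl_cons, if_neg (by rw [hcond]; simp)]
      rw [ih acc s ht (fun x hx => hdisj x (List.mem_cons_of_mem _ hx))]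
      have hmem : c ∉ up := by simpa [List.contains_eq_mem] using hupf
      simp [hmem]

-- first occurrences of l not already in s, in order (the value added by A's second loop)
def pvNewFirsts : List Char → List Char → List Char
  | _, [] => []
  | s, c :: t => if PySem.Set.contains s c then pvNewFirsts s t else c :: pvNewFirsts (s ++ [c]) t

lemma pv_contains_iff (s : List Char) (c : Char) :
    PySem.Set.contains s c = true ↔ c ∈ s := by
  simp [PySem.Set.contains, List.contains_eq_mem]

lemma pv_loopA2 (l : List Char) (acc s : List Char) :
    (l.foldl (fun (st : List Char × PySem.Set Char) c =>
        if !(PySem.Set.contains st.2 c) then (st.1 ++ [c], PySem.Set.add st.2 c) else st) (acc, s)).1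
      = acc ++ pvNewFirsts s l := by
  induction l generalizing acc s with
  | nil => simp [pvNewFirsts]
  | cons c t ih =>
    by_cases hsc : PySem.Set.contains s c = true
    · rw [List.foldl_cons, if_neg (by rw [hsc]; simp)]
      rw [ih acc s]
      simp [pvNewFirsts, (pv_contains_iff s c).mp hsc]
    · have hscf : PySem.Set.contains s c = false := by simpa using hsc
      have hadd : PySem.Set.add s c = s ++ [c] := by unfold PySem.Set.add; rw [hscf]; simp
      rw [List.foldl_cons, if_pos (by rw [hscf]; rfl), hadd]
      rw [ih (acc ++ [c]) (s ++ [c])]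
      have hcs : c ∉ s := by simpa [pv_contains_iff] using hscf
      simp [pvNewFirsts, hcs]

lemma pv_update_eq_newFirsts (l : List Char) : ∀ s : List Char,
    PySem.Set.update s l = s ++ pvNewFirsts s l := by
  induction l with
  | nil => intro s; simp [PySem.Set.update, pvNewFirsts]
  | cons c t ih =>
    intro s
    by_cases hsc : PySem.Set.contains s c = true
    · have hadd : PySem.Set.add s c = s := by unfold PySem.Set.add; rw [hsc]; simp
      show PySem.Set.update (PySem.Set.add s c) t = _
      rw [hadd, ih s]
      simp [pvNewFirsts, (pv_contains_iff s c).mp hsc]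
    · have hscf : PySem.Set.contains s c = false := by simpa using hsc
      have hadd : PySem.Set.add s c = s ++ [c] := by unfold PySem.Set.add; rw [hscf]; simp
      show PySem.Set.update (PySem.Set.add s c) t = _
      rw [hadd, ih (s ++ [c])]
      have hcs : c ∉ s := by simpa [pv_contains_iff] using hscf
      simp [pvNewFirsts, hcs]

lemma pv_dedup_eq_newFirsts (l : List Char) : PySem.List.dedup l = pvNewFirsts [] l := by
  have : PySem.List.dedup l = PySem.Set.update [] l := rfl
  rw [this, pv_update_eq_newFirsts l []]
  simp

lemma pv_newFirsts_filter (l : List Char) : ∀ (s t : List Char),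
    (∀ c ∈ l, (c ∈ s ↔ c ∈ t ∨ c ∈ pvFreq)) →
    pvNewFirsts s l = (pvNewFirsts t l).filter (fun c => !pvFreq.contains c) := by
  induction l with
  | nil => intro s t _; simp [pvNewFirsts]
  | cons c t' ih =>
    intro s t h
    have hc := h c List.mem_cons_self
    have hrest : ∀ x ∈ t', (x ∈ s ↔ x ∈ t ∨ x ∈ pvFreq) :=
      fun x hx => h x (List.mem_cons_of_mem _ hx)
    by_cases hcF : c ∈ pvFreq
    · have hcs : c ∈ s := hc.mpr (Or.inr hcF)
      have hcFb : pvFreq.contains c = true := by simpa [List.contains_eq_mem] using hcF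
      rw [show pvNewFirsts s (c :: t') = pvNewFirsts s t' from by
        simp [pvNewFirsts, hcs]]
      by_cases hct : c ∈ t
      · rw [show pvNewFirsts t (c :: t') = pvNewFirsts t t' from by
          simp [pvNewFirsts, hct]]
        exact ih s t hrest
      · have hctf : PySem.Set.contains t c = false := by
          simpa [pv_contains_iff] using hct
        rw [show pvNewFirsts t (c :: t') = c :: pvNewFirsts (t ++ [c]) t' from by
          simp [pvNewFirsts, hct]]
        rw [List.filter_cons]
        simp only [hcFb, Bool.not_true, Bool.false_eq_true, if_false]
        refine ih s (t ++ [c]) ?_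
        intro x hx
        rw [hrest x hx]
        simp only [List.mem_append, List.mem_singleton]
        constructor
        · rintro (hxt | hxF)
          · exact Or.inl (Or.inl hxt)
          · exact Or.inr hxF
        · rintro ((hxt | hxc) | hxF)
          · exact Or.inl hxt
          · exact Or.inr (hxc ▸ hcF)
          · exact Or.inr hxF
    · have hiff : (c ∈ s) ↔ (c ∈ t) := by rw [hc]; simp [hcF]
      have hcFb : pvFreq.contains c = false := by simpa [List.contains_eq_mem] using hcF
      by_cases hct : c ∈ t
      · rw [show pvNewFirsts s (c :: t') = pvNewFirsts s t' from by
          simp [pvNewFirsts, hiff.mpr hct]]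
        rw [show pvNewFirsts t (c :: t') = pvNewFirsts t t' from by
          simp [pvNewFirsts, hct]]
        exact ih s t hrest
      · have hcs : c ∉ s := fun hx => hct (hiff.mp hx)
        have hssf : PySem.Set.contains s c = false := by simpa [pv_contains_iff] using hcs
        have hctf : PySem.Set.contains t c = false := by simpa [pv_contains_iff] using hct
        rw [show pvNewFirsts s (c :: t') = c :: pvNewFirsts (s ++ [c]) t' from by
          simp [pvNewFirsts, hcs]]
        rw [show pvNewFirsts t (c :: t') = c :: pvNewFirsts (t ++ [c]) t' from by
          simp [pvNewFirsts, hct]]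
        rw [List.filter_cons]
        simp only [hcFb, Bool.not_false, if_true]
        refine congrArg (c :: ·) (ih (s ++ [c]) (t ++ [c]) ?_)
        intro x hx
        simp only [List.mem_append, List.mem_singleton]
        constructor
        · rintro (hxs | hxc)
          · rcases (hrest x hx).mp hxs with h1 | h2
            · exact Or.inl (Or.inl h1)
            · exact Or.inr h2
          · exact Or.inl (Or.inr hxc)
        · rintro ((hxt | hxc) | hxF)
          · exact Or.inl ((hrest x hx).mpr (Or.inl hxt))
          · exact Or.inr hxc
          · exact Or.inl ((hrest x hx).mpr (Or.inr hxF))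

-- the sorted characterisation of B's result
lemma pv_sorted_eq (up : List Char) :
    PySem.List.sorted (PySem.List.dedup up) (pvRank (PySem.List.dedup up)) =
      pvFreq.filter (fun c => up.contains c)
        ++ (PySem.List.dedup up).filter (fun c => !pvFreq.contains c) := by
  set d := PySem.List.dedup up with hd
  apply PySem.List.sorted_eq_of_perm_of_pairwise_lt
  · have hFnd : pvFreq.Nodup := by decide
    have hdnd : d.Nodup := PySem.List.nodup_dedup up
    have h1 : (pvFreq.filter (fun c => up.contains c)).Perm
        (d.filter (fun c => pvFreq.contains c)) := by
      refine (List.perm_ext_iff_of_nodup (hFnd.filter _) (hdnd.filter _)).mpr ?_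
      intro a
      simp [List.mem_filter, hd, List.contains_eq_mem]
      tauto
    exact (h1.append_right _).trans (List.filter_append_perm _ d)
  · have hdnd : d.Nodup := PySem.List.nodup_dedup up
    refine List.pairwise_append.mpr ⟨?_, ?_, ?_⟩
    · refine (pv_pairwise_idxOf_filter pvFreq (fun c => up.contains c) (by decide)).imp_of_mem ?_
      intro a b ha hb hlt
      have haF : a ∈ pvFreq := (List.mem_filter.mp ha).1
      have hbF : b ∈ pvFreq := (List.mem_filter.mp hb).1
      rw [pvRank_of_mem d haF, pvRank_of_mem d hbF]
      exact_mod_cast hlt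
    · refine (pv_pairwise_idxOf_filter d (fun c => !pvFreq.contains c) hdnd).imp_of_mem ?_
      intro a b ha hb hlt
      have haF : a ∉ pvFreq := by
        have := (List.mem_filter.mp ha).2; simpa [List.contains_eq_mem] using this
      have hbF : b ∉ pvFreq := by
        have := (List.mem_filter.mp hb).2; simpa [List.contains_eq_mem] using this
      rw [pvRank_of_not_mem d haF (List.mem_filter.mp ha).1,
          pvRank_of_not_mem d hbF (List.mem_filter.mp hb).1]
      omega
    · intro a ha b hb
      have haF : a ∈ pvFreq := (List.mem_filter.mp ha).1
      have hbF : b ∉ pvFreq := by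
        have := (List.mem_filter.mp hb).2; simpa [List.contains_eq_mem] using this
      rw [pvRank_of_mem d haF, pvRank_of_not_mem d hbF (List.mem_filter.mp hb).1]
      have h1 : pvFreq.idxOf a < 36 := by
        have := List.idxOf_lt_length_of_mem haF
        simpa using this
      have h2 : (0 : Int) ≤ (d.idxOf b : Int) := by positivity
      omega

-- ===== VERDICT (by name: the statement is the Claim_ definition above) =====
theorem create_frequency_adfgvx_square_py_spec : Claim_equal_create_frequency_adfgvx_square_py := by
  intro alphabet _
  unfold Spec_create_frequency_adfgvx_square_py
  unfold create_frequency_adfgvx_square_py create_frequency_adfgvx_square_py_alt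
  set up := PySem.Chars.upper alphabet.toList
  dsimp only
  rw [pv_loopA1 up pvFreq [] PySem.Set.empty (by decide) (fun c _ => rfl)]
  simp only [PySem.Set.empty, List.nil_append]
  rw [pv_loopA2 up (pvFreq.filter (fun c => up.contains c)) (pvFreq.filter (fun c => up.contains c))]
  rw [pv_newFirsts_filter up (pvFreq.filter (fun c => up.contains c)) [] ?_]
  · rw [← pv_dedup_eq_newFirsts, ← pv_sorted_eq up]
    rw [show PySem.List.pyRange 0 6 1 = [0,1,2,3,4,5] from by decide,
        show PySem.List.pyRange 0 36 6 = [0,6,12,18,24,30] from by decide]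
    simp only [List.foldl_cons, List.foldl_nil, List.map_cons, List.map_nil, List.nil_append,
      List.cons_append]
    norm_num
  · intro c hc
    simp [List.mem_filter, List.contains_eq_mem, hc]
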